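-- pv_equiv track=rewrite | github.com/jplee1969/PythonExercise | circleprime.py | get_move_circle
-- ===== SOURCE A (Python) =====
-- def get_num_of_int(x):
--     num = 1
--     tmp = x % 10
--     while tmp != x:
--         x = x // 10
--         num += 1
--         tmp = x % 10
--     return num
--
-- def get_move_circle(x):
--     n = get_num_of_int(x)
--     l = []
--     for i in range(n):
--         y = (x % 10) * (10 ** (n-1)) + x // 10
--         l.append(y)
--         x = y
--     return l
-- ===== SOURCE B (Python) =====
-- def get_move_circle(x):
--     n, p = 1, 10
--     while p <= x:
--         n += 1
--         p *= 10
--     return [(x % 10 ** i) * 10 ** (n - i) + x // 10 ** i for i in range(1, n + 1)]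
-- ===== Notes on version B (the rewrite author's own statement) =====
-- stated objective: alternative
-- what changed: Each rotation is computed independently by a closed formula (x % 10**i) * 10**(n-i) + x // 10**i over i = 1..n, replacing A's accumulator-threaded one-digit-at-a-time rotation, and the digit count is found by growing a power of ten instead of A's repeated division loop.
import Mathlib
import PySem

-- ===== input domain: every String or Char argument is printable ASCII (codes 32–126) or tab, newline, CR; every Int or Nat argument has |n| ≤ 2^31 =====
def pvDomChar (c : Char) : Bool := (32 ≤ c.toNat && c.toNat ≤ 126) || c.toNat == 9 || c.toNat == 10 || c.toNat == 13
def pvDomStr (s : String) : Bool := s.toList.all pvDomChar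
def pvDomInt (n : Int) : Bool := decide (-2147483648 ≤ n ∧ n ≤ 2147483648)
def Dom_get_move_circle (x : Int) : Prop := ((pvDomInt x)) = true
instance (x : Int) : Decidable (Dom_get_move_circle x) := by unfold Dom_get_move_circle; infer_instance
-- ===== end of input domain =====

-- B computes each rotation independently by a closed modular formula over the original number
-- (and finds the digit count by growing a power of ten), replacing A's accumulator-threaded
-- one-digit-at-a-time rotation; equivalence is proved for all nonnegative inputs in the domain.


-- ===== PORT A =====
-- `while tmp != x: x = x // 10; num += 1; tmp = x % 10` — ported with fuel 64, which is never
-- exhausted on the claimed inputs (0 ≤ x ≤ 2^31 < 10^64); Python diverges on negative x.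
def getNumLoop : Nat → Int → Int → Int
  | 0, _, num => num
  | f + 1, x, num =>
      if PySem.Int.mod x 10 ≠ x then getNumLoop f (PySem.Int.floordiv x 10) (num + 1) else num

def get_num_of_int (x : Int) : Int := getNumLoop 64 x 1

-- `10 ** (n-1)`: n ≥ 1 always holds (num starts at 1), so the .toNat exponent is exact.
def get_move_circle (x : Int) : List Int :=
  let n := get_num_of_int x
  ((PySem.List.pyRange 0 n 1).foldl
    (fun (s : List Int × Int) _ =>
      let y := PySem.Int.mod s.2 10 * 10 ^ (n - 1).toNat + PySem.Int.floordiv s.2 10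
      (s.1 ++ [y], y)) ([], x)).1

-- ===== PORT B =====
-- `while p <= x: n += 1; p *= 10` — fuel 64, never exhausted for x ≤ 2^31 (p reaches 10^11 > x).
def bAltLoop : Nat → Int → Int → Int → Int
  | 0, _, n, _ => n
  | f + 1, x, n, p => if p ≤ x then bAltLoop f x (n + 1) (p * 10) else n

-- `[(x % 10**i) * 10**(n-i) + x // 10**i for i in range(1, n+1)]`; 1 ≤ i ≤ n so .toNat is exact.
def get_move_circle_alt (x : Int) : List Int :=
  let n := bAltLoop 64 x 1 10
  (PySem.List.pyRange 1 (n + 1) 1).map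
    (fun i => PySem.Int.mod x (10 ^ i.toNat) * 10 ^ ((n - i).toNat) +
              PySem.Int.floordiv x (10 ^ i.toNat))

-- ===== PRECONDITION & SPEC =====
-- A's while loop never terminates for x < 0 (x // 10 stalls at -1 while x % 10 = 9 ≠ -1),
-- so A returns only on nonnegative inputs; Pre_ excludes exactly the divergent ones.
def Pre_get_move_circle (x : Int) : Prop := 0 ≤ x
instance (x : Int) : Decidable (Pre_get_move_circle x) := by unfold Pre_get_move_circle; infer_instance
def pvWitness_get_move_circle : Int := (123)

def Spec_get_move_circle (x : Int) (out : List Int) : Prop := out = get_move_circle_alt x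
instance (x : Int) (out : List Int) : Decidable (Spec_get_move_circle x out) := by unfold Spec_get_move_circle; infer_instance

-- ===== CLAIM (what is proved, stated in full; the proofs are below) =====
def Claim_equal_get_move_circle : Prop := ∀ (x : Int), Dom_get_move_circle x → Pre_get_move_circle x → Spec_get_move_circle x (get_move_circle x)

-- ===== LEMMAS AND PROOFS =====

-- Reference digit count of a natural number.
def D10 (m : Nat) : Nat :=
  if m < 10 then 1 else D10 (m / 10) + 1
decreasing_by exact Nat.div_lt_self (by omega) (by omega)

lemma D10_pos (m : Nat) : 1 ≤ D10 m := by
  unfold D10; split <;> omega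

lemma D10_small {m : Nat} (h : m < 10) : D10 m = 1 := by
  unfold D10; simp [h]

lemma D10_big {m : Nat} (h : 10 ≤ m) : D10 m = D10 (m / 10) + 1 := by
  rw [D10, if_neg (by omega)]

-- A's digit-count loop computes D10 when the fuel covers the digit count.
lemma loopA_eq (f : Nat) : ∀ (x num : Int), 0 ≤ x → x < 10 ^ f →
    getNumLoop f x num = num - 1 + (D10 x.toNat : Int) := by
  induction f with
  | zero =>
      intro x num hx hlt
      have hx0 : x = 0 := by norm_num at hlt; omega
      subst hx0
      have h1 : getNumLoop 0 0 num = num := rfl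
      rw [h1, D10_small (by omega)]
      push_cast; ring
  | succ f ih =>
      intro x num hx hlt
      have hm : PySem.Int.mod x 10 = x % 10 := PySem.Int.mod_eq_emod_of_pos (by omega)
      have hd : PySem.Int.floordiv x 10 = x / 10 := PySem.Int.floordiv_eq_ediv_of_pos (by omega)
      by_cases hx10 : x < 10
      · have hcond : PySem.Int.mod x 10 = x := by rw [hm]; omega
        rw [getNumLoop, if_neg (not_not_intro hcond), D10_small (by omega)]
        omega
      · have hcond : PySem.Int.mod x 10 ≠ x := by rw [hm]; omega
        rw [getNumLoop, if_pos hcond, hd]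
        have h10f : (0:Int) < 10 ^ f := by positivity
        have hlt' : x / 10 < 10 ^ f := by
          rw [Int.ediv_lt_iff_lt_mul (by omega)]
          calc x < 10 ^ (f + 1) := hlt
            _ = 10 ^ f * 10 := by ring
        rw [ih (x / 10) (num + 1) (Int.ediv_nonneg hx (by omega)) hlt']
        rw [D10_big (m := x.toNat) (by omega)]
        have : (x / 10).toNat = x.toNat / 10 := by omega
        rw [this]; push_cast; omega

-- B's digit-count loop computes D10: invariant for p = 10^(k+1).
lemma loopB_eq (f : Nat) : ∀ (x n : Int) (k : Nat), 0 ≤ x → x < 10 ^ (f + k + 1) →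
    bAltLoop f x n ((10:Int) ^ (k + 1)) = n - 1 + (D10 ((x / 10 ^ k).toNat) : Int) := by
  induction f with
  | zero =>
      intro x n k hx hlt
      have hk : (0:Int) < 10 ^ k := by positivity
      have hq : x / 10 ^ k < 10 := by
        rw [Int.ediv_lt_iff_lt_mul hk]
        calc x < 10 ^ (0 + k + 1) := hlt
          _ = 10 * 10 ^ k := by ring
      rw [bAltLoop, D10_small (by omega)]
      omega
  | succ f ih =>
      intro x n k hx hlt
      have hk : (0:Int) < 10 ^ k := by positivity
      by_cases hc : (10:Int) ^ (k + 1) ≤ x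
      · rw [bAltLoop, if_pos hc]
        have hstep : (10:Int) ^ (k + 1) * 10 = 10 ^ (k + 1 + 1) := by ring
        rw [hstep, ih x (n + 1) (k + 1) hx (by calc x < 10 ^ (f + 1 + k + 1) := hlt
              _ = 10 ^ (f + (k + 1) + 1) := by ring_nf)]
        have hdiv : x / 10 ^ (k + 1) = (x / 10 ^ k) / 10 := by
          rw [Int.ediv_ediv_eq_ediv_mul (le_of_lt hk)]; ring_nf
        have hge : (10:Int) ≤ x / 10 ^ k := by
          rw [Int.le_ediv_iff_mul_le hk]
          calc (10:Int) * 10 ^ k = 10 ^ (k + 1) := by ring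
            _ ≤ x := hc
        have hD := D10_big (m := (x / 10 ^ k).toNat) (by omega)
        have htn : ((x / 10 ^ k) / 10).toNat = (x / 10 ^ k).toNat / 10 := by
          have : 0 ≤ x / 10 ^ k := Int.ediv_nonneg hx hk.le
          omega
        rw [hdiv, htn, hD]
        push_cast; ring
      · rw [bAltLoop, if_neg hc]
        push_neg at hc
        have hq : x / 10 ^ k < 10 := by
          rw [Int.ediv_lt_iff_lt_mul hk]
          calc x < 10 ^ (k + 1) := hc
            _ = 10 * 10 ^ k := by ring
        rw [D10_small (by omega)]
        omega

-- The closed rotation formula.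
def F (x : Int) (n i : Nat) : Int := x % 10 ^ i * 10 ^ (n - i) + x / 10 ^ i

lemma F_zero (x : Int) (n : Nat) : F x n 0 = x := by
  simp [F]

-- One single-digit rotation of F x n j is F x n (j+1).
lemma F_step (x : Int) (hx : 0 ≤ x) (n j : Nat) (hj : j + 1 ≤ n) :
    F x n j % 10 * 10 ^ (n - 1) + F x n j / 10 = F x n (j + 1) := by
  set P : Int := 10 ^ j with hP
  have hPpos : (0:Int) < P := by positivity
  set r : Int := x % P with hr
  set q : Int := x / P with hq
  have hrb : 0 ≤ r ∧ r < P := ⟨Int.emod_nonneg x (by omega), Int.emod_lt_of_pos x hPpos⟩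
  have hqb : 0 ≤ q := Int.ediv_nonneg hx hPpos.le
  have hxeq : x = P * q + r := by rw [hr, hq]; rw [Int.ediv_add_emod x P]
  obtain ⟨e, he⟩ : ∃ e, n - j = e + 1 := ⟨n - j - 1, by omega⟩
  have hF : F x n j = q + (r * 10 ^ e) * 10 := by
    rw [F, ← hr, ← hq, he]; ring
  have h1 : F x n j % 10 = q % 10 := by rw [hF, Int.add_mul_emod_self_right]
  have h2 : F x n j / 10 = q / 10 + r * 10 ^ e := by
    rw [hF, Int.add_mul_ediv_right _ _ (by omega : (10:Int) ≠ 0)]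
  have h3 : x / 10 ^ (j + 1) = q / 10 := by
    rw [pow_succ, ← Int.ediv_ediv_eq_ediv_mul (by positivity), ← hq]
  have h4 : x % 10 ^ (j + 1) = r + P * (q % 10) := by
    have hq10 : q = 10 * (q / 10) + q % 10 := (Int.ediv_add_emod q 10).symm
    have hx2 : x = 10 ^ (j + 1) * (q / 10) + (r + P * (q % 10)) := by
      rw [hxeq, pow_succ, ← hP]
      nlinarith [hq10]
    have hm10 : 0 ≤ q % 10 ∧ q % 10 < 10 :=
      ⟨Int.emod_nonneg q (by omega), Int.emod_lt_of_pos q (by omega)⟩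
    have hbound : r + P * (q % 10) < 10 ^ (j + 1) := by
      rw [pow_succ, ← hP]
      nlinarith [hrb.2, hm10.2]
    rw [hx2, add_comm ((10:Int) ^ (j + 1) * (q / 10)), Int.add_mul_emod_self_left,
        Int.emod_eq_of_lt (by nlinarith [hrb.1, hm10.1, hPpos]) hbound]
  have hn1 : n - 1 = j + e := by omega
  have hnj1 : n - (j + 1) = e := by omega
  have hR : F x n (j + 1) = (r + P * (q % 10)) * 10 ^ e + q / 10 := by
    rw [F, h4, h3, hnj1]
  rw [h1, h2, hR, hn1, pow_add, ← hP]
  ring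

-- A's rotation fold produces the list of closed-form rotations.
lemma fold_eq (x : Int) (hx : 0 ≤ x) (n : Nat) : ∀ k, k ≤ n →
    (List.range k).foldl
      (fun (s : List Int × Int) (_ : Nat) =>
        (s.1 ++ [s.2 % 10 * 10 ^ (n - 1) + s.2 / 10], s.2 % 10 * 10 ^ (n - 1) + s.2 / 10))
      ([], x)
    = ((List.range k).map (fun j => F x n (j + 1)), F x n k) := by
  intro k
  induction k with
  | zero => intro _; simp [F_zero]
  | succ k ih =>
      intro hk
      rw [List.range_succ, List.foldl_append, List.map_append, ih (by omega)]
      simp only [List.foldl_cons, List.foldl_nil, List.map_cons, List.map_nil]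
      rw [F_step x hx n k (by omega)]

-- pyRange 1 (n+1) is the shifted List.range.
lemma pyRange_one_shift (n : Nat) :
    PySem.List.pyRange 1 ((n : Int) + 1) 1 = (List.range n).map (fun (j : Nat) => (j : Int) + 1) := by
  induction n with
  | zero => simp [PySem.List.pyRange]
  | succ n ih =>
      have h : (((n : Nat) + 1 : Nat) : Int) + 1 = ((n : Int) + 1) + 1 := by push_cast; ring
      rw [h, PySem.List.pyRange_one_succ_right (by omega), ih, List.range_succ]
      simp

-- B's comprehension equals the list of closed-form rotations.
lemma B_map_eq (x : Int) (n : Nat) :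
    (PySem.List.pyRange 1 ((n : Int) + 1) 1).map
      (fun i => PySem.Int.mod x (10 ^ i.toNat) * 10 ^ (((n : Int) - i).toNat) +
        PySem.Int.floordiv x (10 ^ i.toNat))
    = (List.range n).map (fun j => F x n (j + 1)) := by
  rw [pyRange_one_shift n, List.map_map]
  apply List.map_congr_left
  intro j hj
  have hjn : j < n := List.mem_range.mp hj
  have h1 : ((j : Int) + 1).toNat = j + 1 := by omega
  have h2 : ((n : Int) - ((j : Int) + 1)).toNat = n - (j + 1) := by omega
  have hp : (0:Int) < 10 ^ (j + 1) := by positivity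
  simp only [Function.comp_apply, h1, h2, PySem.Int.mod_eq_emod_of_pos hp,
    PySem.Int.floordiv_eq_ediv_of_pos hp]
  rfl

-- ===== VERDICT (by name: the statement is the Claim_ definition above) =====
theorem get_move_circle_spec : Claim_equal_get_move_circle := by
  intro x hdom hpre
  unfold Spec_get_move_circle
  have hx : 0 ≤ x := hpre
  have hbound : x ≤ 2147483648 := by
    unfold Dom_get_move_circle pvDomInt at hdom
    simpa using of_decide_eq_true hdom |>.2
  set n : Nat := D10 x.toNat with hn
  have hn1 : 1 ≤ n := D10_pos _
  -- both digit counts equal n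
  have hxlt : x < 10 ^ 64 := lt_of_le_of_lt hbound (by norm_num)
  have hA : get_num_of_int x = (n : Int) := by
    unfold get_num_of_int
    rw [loopA_eq 64 x 1 hx hxlt]; ring
  have hB : bAltLoop 64 x 1 10 = (n : Int) := by
    have h10 : (10:Int) = 10 ^ (0 + 1) := by norm_num
    rw [h10, loopB_eq 64 x 1 0 hx (lt_of_le_of_lt hbound (by norm_num))]
    simp [hn]
  -- A's side
  simp only [get_move_circle, get_move_circle_alt]
  rw [hA, hB]
  have hsub1 : ((n : Int) - 1).toNat = n - 1 := by omega
  have hrange := PySem.List.pyRange_zero_natCast n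
  rw [hrange, List.foldl_map, hsub1]
  have hfun : (fun (s : List Int × Int) (_ : Nat) =>
      (s.1 ++ [PySem.Int.mod s.2 10 * 10 ^ (n - 1) + PySem.Int.floordiv s.2 10],
        PySem.Int.mod s.2 10 * 10 ^ (n - 1) + PySem.Int.floordiv s.2 10))
      = (fun (s : List Int × Int) (_ : Nat) =>
      (s.1 ++ [s.2 % 10 * 10 ^ (n - 1) + s.2 / 10], s.2 % 10 * 10 ^ (n - 1) + s.2 / 10)) := by
    funext s k
    rw [PySem.Int.mod_eq_emod_of_pos (by omega), PySem.Int.floordiv_eq_ediv_of_pos (by omega)]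
  rw [hfun, fold_eq x hx n n le_rfl, B_map_eq x n]
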